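-- pv_equiv track=rewrite | github.com/envomp/2018-Introduction-to-Programming | ktj1/exam.py | list_move2
-- ===== SOURCE A (Python) =====
-- def list_move2(initial_list: list, amount: int, factor: int) -> list:
--     """
--     Create amount lists where elements are shifted right by factor.
--     """
--     out = []
--
--     if factor > len(initial_list) and len(initial_list) > 0:
--         factor = factor % len(initial_list)
--
--     for i in range(amount):
--         out.append(initial_list[-factor * i % len(initial_list) if len(initial_list) > 0 else 1:] +
--                    initial_list[:-factor * i % len(initial_list) if len(initial_list) > 0 else 1])
--
--     return out
-- ===== SOURCE B (Python) =====
-- def list_move2(initial_list: list, amount: int, factor: int) -> list: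
--     n = len(initial_list)
--     if n == 0:
--         return [[] for _ in range(amount)]
--     m = (-factor) % n
--     out = []
--     cur = list(initial_list)
--     for _ in range(amount):
--         out.append(cur)
--         cur = cur[m:] + cur[:m]
--     return out
-- ===== Notes on version B (the rewrite author's own statement) =====
-- stated objective: alternative
-- what changed: B keeps a running rotated copy and advances it by the constant step (-factor) % len each iteration, instead of A's per-iteration index expression (-factor*i % len) with two slices recomputed from the original list; the empty-list and factor-reduction branches of A disappear.
import Mathlib
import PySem

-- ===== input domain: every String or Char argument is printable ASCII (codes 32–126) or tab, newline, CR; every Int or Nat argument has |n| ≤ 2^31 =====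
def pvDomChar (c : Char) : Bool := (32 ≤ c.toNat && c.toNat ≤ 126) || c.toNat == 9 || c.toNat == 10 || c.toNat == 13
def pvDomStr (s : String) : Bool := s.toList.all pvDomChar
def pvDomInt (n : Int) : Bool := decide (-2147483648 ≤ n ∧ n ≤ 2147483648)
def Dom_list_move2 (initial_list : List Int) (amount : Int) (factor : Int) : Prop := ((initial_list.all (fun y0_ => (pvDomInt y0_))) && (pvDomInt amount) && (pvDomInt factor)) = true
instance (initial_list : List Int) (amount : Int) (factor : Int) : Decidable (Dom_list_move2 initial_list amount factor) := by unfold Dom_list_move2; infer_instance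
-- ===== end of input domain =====

-- B replaces A's per-iteration index-and-slice rotation by a running rotated list advanced
-- by a constant step each iteration (objective: alternative decomposition, same cost).

-- ===== PORT A =====
def list_move2 (initial_list : List Int) (amount : Int) (factor : Int) : List (List Int) :=
  let n : Int := initial_list.length
  let factor1 : Int := if factor > n ∧ n > 0 then PySem.Int.mod factor n else factor
  (PySem.List.pyRange 0 amount 1).foldl
    (fun out i =>
      out ++ [PySem.List.slice initial_list
                (some (if n > 0 then PySem.Int.mod (-factor1 * i) n else 1)) none ++
              PySem.List.slice initial_list none
                (some (if n > 0 then PySem.Int.mod (-factor1 * i) n else 1))])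
    []

-- ===== PORT B =====
def list_move2_alt (initial_list : List Int) (amount : Int) (factor : Int) : List (List Int) :=
  if initial_list.length = 0 then
    (PySem.List.pyRange 0 amount 1).map (fun _ => ([] : List Int))
  else
    let m : Nat := (PySem.Int.mod (-factor) initial_list.length).toNat
    ((PySem.List.pyRange 0 amount 1).foldl
      (fun (st : List (List Int) × List Int) _ =>
        (st.1 ++ [st.2], st.2.drop m ++ st.2.take m))
      ([], initial_list)).1

-- ===== PRECONDITION & SPEC =====
def Spec_list_move2 (initial_list : List Int) (amount : Int) (factor : Int) (out : List (List Int)) : Prop := out = list_move2_alt initial_list amount factor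
instance (initial_list : List Int) (amount : Int) (factor : Int) (out : List (List Int)) : Decidable (Spec_list_move2 initial_list amount factor out) := by unfold Spec_list_move2; infer_instance

-- ===== CLAIM (what is proved, stated in full; the proofs are below) =====
def Claim_equal_list_move2 : Prop := ∀ (initial_list : List Int) (amount : Int) (factor : Int), Dom_list_move2 initial_list amount factor → Spec_list_move2 initial_list amount factor (list_move2 initial_list amount factor)

-- ===== LEMMAS AND PROOFS =====

-- pyRange 0 a 1 as a mapped Nat range (also valid for a ≤ 0, both sides empty)
lemma pyRange_zero_eq (a : Int) :
    PySem.List.pyRange 0 a 1 = (List.range a.toNat).map (fun k : Nat => (k : Int)) := by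
  by_cases h : a ≤ 0
  · rw [PySem.List.pyRange_one_eq_nil h, Int.toNat_of_nonpos h]
    simp
  · rw [← Int.toNat_of_nonneg (by omega : (0:Int) ≤ a)]
    exact PySem.List.pyRange_zero_natCast a.toNat

-- one drop/take rotation step on a list longer than the step is List.rotate
lemma step_eq_rotate (l : List Int) (m : Nat) (h : m < l.length) :
    l.drop m ++ l.take m = l.rotate m := by
  simp [List.rotate, Nat.mod_eq_of_lt h]

-- B's loop invariant: after j iterations, out holds the first j rotations and
-- cur is the list rotated by m*j
lemma alt_loop (l : List Int) (m : Nat) (h : m < l.length) (j : Nat) :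
    ((List.range j).foldl
      (fun (st : List (List Int) × List Int) (_ : Nat) =>
        (st.1 ++ [st.2], st.2.drop m ++ st.2.take m))
      ([], l))
    = ((List.range j).map (fun i => l.rotate (m * i)), l.rotate (m * j)) := by
  induction j with
  | zero => simp
  | succ j ih =>
    rw [List.range_succ, List.foldl_append, ih]
    simp only [List.foldl_cons, List.foldl_nil, Prod.mk.injEq]
    refine ⟨?_, ?_⟩
    · simp
    · rw [step_eq_rotate _ _ (by simpa using h), List.rotate_rotate]
      ring_nf

-- A's element at index i equals the rotation B maintains there
lemma elem_eq_rotate (l : List Int) (factor : Int) (hl : 0 < l.length) (k : Nat) :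
    (PySem.List.slice l
        (some (PySem.Int.mod (-(if factor > (l.length : Int) ∧ (l.length : Int) > 0
                  then PySem.Int.mod factor l.length else factor) * (k : Int)) l.length)) none ++
     PySem.List.slice l none
        (some (PySem.Int.mod (-(if factor > (l.length : Int) ∧ (l.length : Int) > 0
                  then PySem.Int.mod factor l.length else factor) * (k : Int)) l.length)))
    = l.rotate ((PySem.Int.mod (-factor) l.length).toNat * k) := by
  have hn : (0 : Int) < (l.length : Int) := by exact_mod_cast hl
  set f1 : Int := if factor > (l.length : Int) ∧ (l.length : Int) > 0
      then PySem.Int.mod factor l.length else factor with hf1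
  set c : Int := PySem.Int.mod (-f1 * (k : Int)) l.length with hc
  have hc0 : 0 ≤ c := PySem.Int.mod_nonneg _ hn
  have hclt : c < (l.length : Int) := PySem.Int.mod_lt _ hn
  rw [PySem.List.slice_from l hc0, PySem.List.slice_to l hc0,
      step_eq_rotate _ _ (by omega)]
  -- both rotations agree mod the length
  set m : Nat := (PySem.Int.mod (-factor) l.length).toNat with hm
  have hmInt : (m : Int) = (-factor) % (l.length : Int) := by
    rw [hm, PySem.Int.mod_eq_emod_of_pos hn,
        Int.toNat_of_nonneg (Int.emod_nonneg _ (by omega))]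
  rw [← List.rotate_mod l c.toNat, ← List.rotate_mod l (m * k)]
  congr 1
  -- reduce the Nat congruence to an Int congruence
  have key : c % (l.length : Int) = ((m : Int) * (k : Int)) % (l.length : Int) := by
    have hf : f1 % (l.length : Int) = factor % (l.length : Int) := by
      rw [hf1]; split_ifs with h
      · rw [PySem.Int.mod_eq_emod_of_pos hn, Int.emod_emod_of_dvd _ dvd_rfl]
      · rfl
    have h1 : c % (l.length : Int) = (-f1 * (k : Int)) % (l.length : Int) := by
      rw [hc, PySem.Int.mod_eq_emod_of_pos hn, Int.emod_emod_of_dvd _ dvd_rfl]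
    have h2 : (-f1 * (k : Int)) % (l.length : Int)
        = (-factor * (k : Int)) % (l.length : Int) := by
      have : f1 ≡ factor [ZMOD (l.length : Int)] := hf
      exact ((this.neg).mul_right (k : Int))
    have h3 : (-factor * (k : Int)) % (l.length : Int)
        = ((m : Int) * (k : Int)) % (l.length : Int) := by
      have : (-factor) ≡ (m : Int) [ZMOD (l.length : Int)] := by
        unfold Int.ModEq
        rw [hmInt, Int.emod_emod_of_dvd _ dvd_rfl]
      exact this.mul_right (k : Int)
    rw [h1, h2, h3]
  have : ((c.toNat % l.length : Nat) : Int) = ((m * k % l.length : Nat) : Int) := by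
    push_cast
    rw [Int.toNat_of_nonneg hc0]
    exact key
  exact_mod_cast this

-- ===== VERDICT (by name: the statement is the Claim_ definition above) =====
theorem list_move2_spec : Claim_equal_list_move2 := by
  intro l amount factor _
  show list_move2 l amount factor = list_move2_alt l amount factor
  simp only [list_move2, list_move2_alt]
  by_cases hl : l.length = 0
  · -- empty list: every appended slice is []
    have hnil : l = [] := List.length_eq_zero_iff.mp hl
    subst hnil
    simp [PySem.List.slice]
  · rw [if_neg hl]
    have hl' : 0 < l.length := Nat.pos_of_ne_zero hl
    have hnI : (0 : Int) < (l.length : Int) := by exact_mod_cast hl'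
    have hm : (PySem.Int.mod (-factor) (l.length : Int)).toNat < l.length := by
      have h1 := PySem.Int.mod_lt (-factor) hnI
      have h2 := PySem.Int.mod_nonneg (-factor) hnI
      omega
    rw [PySem.List.foldl_append_singleton_eq_map, pyRange_zero_eq, List.map_map,
        List.foldl_map, alt_loop l _ hm]
    simp only [List.nil_append]
    refine List.map_congr_left ?_
    intro k _
    simp only [Function.comp_apply, if_pos hnI]
    exact elem_eq_rotate l factor hl' k
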